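-- pv_equiv track=rewrite | github.com/tonydosreis/DecisionTrees | decisionTree.py | isDeterministic
-- ===== SOURCE A (Python) =====
-- def isDeterministic(X):
--     """tests if the x[:-1] is always associated with the same x[-1], in other words, if the same input always has the same output"""
--     seen = dict()
--     for x in X:
--         x = tuple(x)
--         if x[:-1] not in seen:
--             seen[x[:-1]] = x[-1]
--         else:
--             if( seen[x[:-1]] != x[-1] ):
--                 return False
--     return True
-- ===== SOURCE B (Python) =====
-- def isDeterministic(X):
--     """tests if the x[:-1] is always associated with the same x[-1], in other words, if the same input always has the same output"""
--     pending = list(X)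
--     while pending:
--         t = tuple(pending[0])
--         key, out = t[:-1], t[-1]
--         rest = []
--         for x in pending[1:]:
--             u = tuple(x)
--             if u[:-1] == key:
--                 if u[-1] != out:
--                     return False
--             else:
--                 rest.append(x)
--         pending = rest
--     return True
-- ===== Notes on version B (the rewrite author's own statement) =====
-- stated objective: alternative
-- what changed: B uses no dictionary/hashing at all: it repeatedly takes the first remaining row's key, checks every remaining row with that key for a conflicting output, filters that group away, and repeats on what is left (group-eliminate loop, O(n*k) with k distinct keys, vs A's single hashed pass).
-- outside the precondition, e.g. on isDeterministic([[1], [2, 0], [2, 1], []]): A returns False, B raises IndexError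
import Mathlib
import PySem

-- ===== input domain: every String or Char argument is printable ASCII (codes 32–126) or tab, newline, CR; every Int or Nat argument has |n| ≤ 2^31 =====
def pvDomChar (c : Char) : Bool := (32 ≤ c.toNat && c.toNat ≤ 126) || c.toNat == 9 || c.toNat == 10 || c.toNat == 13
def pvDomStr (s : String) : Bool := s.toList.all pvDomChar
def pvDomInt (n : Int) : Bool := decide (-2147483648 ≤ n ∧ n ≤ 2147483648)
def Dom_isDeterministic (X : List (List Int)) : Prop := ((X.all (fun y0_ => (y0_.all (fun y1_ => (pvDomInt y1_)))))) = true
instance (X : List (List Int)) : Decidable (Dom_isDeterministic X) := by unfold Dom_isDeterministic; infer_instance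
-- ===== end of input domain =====

-- B drops the dictionary entirely: a group-elimination loop that repeatedly takes the first
-- remaining row's key, scans the remaining rows of that group for a conflict, filters the group
-- away and repeats (alternative decomposition, O(n*k) vs A's hashed O(n)); equivalence is proved
-- on inputs whose rows are all nonempty (elsewhere one of the programs raises IndexError).

-- ===== PORT A =====
-- literal port of A: one loop over X with a growing dict, early return False on a conflict
def isDeterministicLoop (seen : PySem.Dict (List Int) Int) : List (List Int) → Bool
  | [] => true
  | x :: rest =>
    let key := PySem.List.slice x none (some (-1))          -- x[:-1]
    if seen.contains key = false then
      match PySem.List.pyGet? x (-1) with                   -- x[-1]; none = IndexError (outside Pre_)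
      | none => false
      | some v => isDeterministicLoop (seen.insert key v) rest
    else
      match PySem.List.pyGet? x (-1) with
      | none => false
      | some v => if seen.get? key != some v then false else isDeterministicLoop seen rest

def isDeterministic (X : List (List Int)) : Bool :=
  isDeterministicLoop PySem.Dict.empty X

-- ===== PORT B =====
-- inner `for x in pending[1:]` loop of B: none = early `return False` (or IndexError on an
-- empty row whose key matches, outside Pre_), some rest = the rows kept for the next round
def altScan (key : List Int) (out : Int) : List (List Int) → Option (List (List Int))
  | [] => some []
  | x :: xs =>
    if PySem.List.slice x none (some (-1)) == key then      -- u[:-1] == key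
      match PySem.List.pyGet? x (-1) with                   -- u[-1]; none = IndexError (outside Pre_)
      | none => none
      | some v => if v != out then none else altScan key out xs
    else
      (altScan key out xs).map (x :: ·)                     -- rest.append(x)

-- literal port of B (Source B): while pending: take first row's (key, out), scan the rest, repeat;
-- the fuel argument (initially X.length) only makes the shrinking while-loop structural: each
-- round strictly shrinks pending, so fuel never runs out
def altGo : Nat → List (List Int) → Bool
  | _, [] => true
  | 0, _ :: _ => true
  | fuel + 1, x :: xs =>
    match PySem.List.pyGet? x (-1) with                     -- out = t[-1]; none = IndexError (outside Pre_)
    | none => false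
    | some out =>
      match altScan (PySem.List.slice x none (some (-1))) out xs with
      | none => false
      | some rest => altGo fuel rest

def isDeterministic_alt (X : List (List Int)) : Bool := altGo X.length X

-- ===== PRECONDITION & SPEC =====
-- Pre_ excludes inputs containing an empty row: there whichever of the two programs reaches the
-- empty row first raises IndexError on x[-1] (each can also early-return False before reaching
-- it, so each may return where the other raises).
def Pre_isDeterministic (X : List (List Int)) : Prop := ∀ x ∈ X, x ≠ []
instance (X : List (List Int)) : Decidable (Pre_isDeterministic X) := by unfold Pre_isDeterministic; infer_instance
def pvWitness_isDeterministic : List (List Int) := [[1, 2], [1, 2], [3, 4]]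

def Spec_isDeterministic (X : List (List Int)) (out : Bool) : Prop := out = isDeterministic_alt X
instance (X : List (List Int)) (out : Bool) : Decidable (Spec_isDeterministic X out) := by unfold Spec_isDeterministic; infer_instance

-- ===== CLAIM (what is proved, stated in full; the proofs are below) =====
def Claim_equal_isDeterministic : Prop := ∀ (X : List (List Int)), Dom_isDeterministic X → Pre_isDeterministic X → Spec_isDeterministic X (isDeterministic X)

-- ===== LEMMAS AND PROOFS =====

-- the common mathematical meaning: every key maps to a single output
def Consistent (X : List (List Int)) : Prop :=
  ∀ a ∈ X, ∀ b ∈ X, a.dropLast = b.dropLast → a.getLast? = b.getLast?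

-- ---- A side ----

-- the index-building fold, written over getLast?/dropLast
def buildF (seen : PySem.Dict (List Int) Int) (l : List (List Int)) : PySem.Dict (List Int) Int :=
  l.foldl (fun d x =>
    match x.getLast? with
    | none => d
    | some out => d.setdefault x.dropLast out) seen

lemma get?_setdefault_mono (d : PySem.Dict (List Int) Int) (k k' : List Int) (v o : Int)
    (h : d.get? k = some v) : (d.setdefault k' o).get? k = some v := by
  by_cases hk : k = k'
  · subst hk; rw [PySem.Dict.get?_setdefault_self, h]; rfl
  · rw [PySem.Dict.get?_setdefault_of_ne d o hk, h]

lemma buildF_mono (l : List (List Int)) : ∀ (seen : PySem.Dict (List Int) Int) (k : List Int) (v : Int),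
    seen.get? k = some v → (buildF seen l).get? k = some v := by
  induction l with
  | nil => intro seen k v h; simpa [buildF] using h
  | cons x rest ih =>
    intro seen k v h
    cases hx : x.getLast? with
    | none => simpa [buildF, hx] using ih seen k v h
    | some o =>
      simpa [buildF, hx] using ih _ k v (get?_setdefault_mono seen k x.dropLast v o h)

lemma buildF_get?_some (l : List (List Int)) : ∀ (seen : PySem.Dict (List Int) Int) (k : List Int) (v : Int),
    (buildF seen l).get? k = some v →
    seen.get? k = some v ∨ ∃ y ∈ l, y.dropLast = k ∧ y.getLast? = some v := by
  induction l with
  | nil => intro seen k v h; exact Or.inl (by simpa [buildF] using h)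
  | cons x rest ih =>
    intro seen k v h
    cases hx : x.getLast? with
    | none =>
      rw [show buildF seen (x :: rest) = buildF seen rest from by simp [buildF, hx]] at h
      rcases ih seen k v h with h' | ⟨y, hy, hk, hv⟩
      · exact Or.inl h'
      · exact Or.inr ⟨y, List.mem_cons_of_mem _ hy, hk, hv⟩
    | some o =>
      rw [show buildF seen (x :: rest) = buildF (seen.setdefault x.dropLast o) rest from
        by simp [buildF, hx]] at h
      rcases ih _ k v h with h' | ⟨y, hy, hk, hv⟩
      · by_cases hkk : k = x.dropLast
        · subst hkk
          rw [PySem.Dict.get?_setdefault_self] at h'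
          cases hs : seen.get? x.dropLast with
          | none =>
            rw [hs] at h'
            simp only [Option.getD_none, Option.some_inj] at h'
            exact Or.inr ⟨x, List.mem_cons_self .., rfl, by rw [hx, h']⟩
          | some w =>
            rw [hs] at h'
            simp only [Option.getD_some] at h'
            exact Or.inl h'
        · rw [PySem.Dict.get?_setdefault_of_ne seen o hkk] at h'
          exact Or.inl h'
      · exact Or.inr ⟨y, List.mem_cons_of_mem _ hy, hk, hv⟩

lemma buildF_get?_isSome (l : List (List Int)) : ∀ (seen : PySem.Dict (List Int) Int) (x : List Int) (o : Int),
    x ∈ l → x.getLast? = some o → ∃ v, (buildF seen l).get? x.dropLast = some v := by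
  induction l with
  | nil => intro _ _ _ h; simp at h
  | cons z rest ih =>
    intro seen x o hmem hgl
    rcases List.mem_cons.mp hmem with rfl | hmem'
    · rw [show buildF seen (x :: rest) = buildF (seen.setdefault x.dropLast o) rest from
        by simp [buildF, hgl]]
      exact ⟨(seen.get? x.dropLast).getD o,
        buildF_mono rest _ _ _ (PySem.Dict.get?_setdefault_self ..)⟩
    · cases hz : z.getLast? with
      | none =>
        rw [show buildF seen (z :: rest) = buildF seen rest from by simp [buildF, hz]]
        exact ih seen x o hmem' hgl
      | some oz =>
        rw [show buildF seen (z :: rest) = buildF (seen.setdefault z.dropLast oz) rest from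
          by simp [buildF, hz]]
        exact ih _ x o hmem' hgl

lemma loop_eq_buildF (rest : List (List Int)) : ∀ (seen : PySem.Dict (List Int) Int),
    (∀ x ∈ rest, x ≠ []) →
    (isDeterministicLoop seen rest = true ↔
      ∀ x ∈ rest, (buildF seen rest).get? x.dropLast = x.getLast?) := by
  induction rest with
  | nil => intro seen _; simp [isDeterministicLoop]
  | cons x rest ih =>
    intro seen hne
    have hx : x ≠ [] := hne x (List.mem_cons_self ..)
    obtain ⟨o, ho⟩ : ∃ o, x.getLast? = some o :=
      Option.isSome_iff_exists.mp (List.getLast?_isSome.mpr hx)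
    have hrest : ∀ y ∈ rest, y ≠ [] := fun y hy => hne y (List.mem_cons_of_mem _ hy)
    have hbuild : buildF seen (x :: rest) = buildF (seen.setdefault x.dropLast o) rest := by
      simp [buildF, ho]
    by_cases hc : seen.contains x.dropLast = true
    · -- key already present
      obtain ⟨w, hw⟩ : ∃ w, seen.get? x.dropLast = some w := by
        have h := PySem.Dict.contains_eq_isSome_get? seen x.dropLast
        rw [hc] at h
        exact Option.isSome_iff_exists.mp h.symm
      have hsd : seen.setdefault x.dropLast o = seen := PySem.Dict.setdefault_of_contains seen o hc
      have hkey : (buildF seen (x :: rest)).get? x.dropLast = some w := by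
        rw [hbuild, hsd]; exact buildF_mono rest seen _ w hw
      by_cases hwo : w = o
      · subst hwo
        have hA : isDeterministicLoop seen (x :: rest) = isDeterministicLoop seen rest := by
          simp [isDeterministicLoop, PySem.List.slice_to_neg_one, PySem.List.pyGet?_neg_one,
            hc, ho, hw]
        rw [hA, ih seen hrest]
        constructor
        · intro h y hy
          rcases List.mem_cons.mp hy with rfl | hy'
          · rw [hkey, ho]
          · rw [hbuild, hsd]; exact h y hy'
        · intro h y hy
          have := h y (List.mem_cons_of_mem _ hy)
          rwa [hbuild, hsd] at this
      · have hA : isDeterministicLoop seen (x :: rest) = false := by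
          simp [isDeterministicLoop, PySem.List.slice_to_neg_one, PySem.List.pyGet?_neg_one,
            hc, ho, hw, hwo]
        rw [hA]
        simp only [Bool.false_eq_true, false_iff]
        intro h
        have := h x (List.mem_cons_self ..)
        rw [hkey, ho] at this
        exact hwo (Option.some_injective _ this)
    · -- fresh key: insert
      have hc' : seen.contains x.dropLast = false := by
        cases h : seen.contains x.dropLast
        · rfl
        · exact absurd h hc
      have hsd : seen.setdefault x.dropLast o = seen.insert x.dropLast o :=
        PySem.Dict.setdefault_of_not_contains seen o hc'
      have hkey : (buildF seen (x :: rest)).get? x.dropLast = some o := by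
        rw [hbuild, hsd]
        exact buildF_mono rest _ _ o (PySem.Dict.get?_insert_self _ _ _)
      have hA : isDeterministicLoop seen (x :: rest)
          = isDeterministicLoop (seen.insert x.dropLast o) rest := by
        simp [isDeterministicLoop, PySem.List.slice_to_neg_one, PySem.List.pyGet?_neg_one,
          hc', ho]
      rw [hA, ih (seen.insert x.dropLast o) hrest]
      constructor
      · intro h y hy
        rcases List.mem_cons.mp hy with rfl | hy'
        · rw [hkey, ho]
        · rw [hbuild, hsd]; exact h y hy'
      · intro h y hy
        have := h y (List.mem_cons_of_mem _ hy)
        rwa [hbuild, hsd] at this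

lemma A_iff (X : List (List Int)) (hpre : ∀ x ∈ X, x ≠ []) :
    (isDeterministic X = true ↔ Consistent X) := by
  unfold isDeterministic
  rw [loop_eq_buildF X PySem.Dict.empty hpre]
  constructor
  · intro h a ha b hb hab
    rw [← h a ha, ← h b hb, hab]
  · intro hcons x hx
    obtain ⟨o, ho⟩ : ∃ o, x.getLast? = some o :=
      Option.isSome_iff_exists.mp (List.getLast?_isSome.mpr (hpre x hx))
    obtain ⟨v, hv⟩ := buildF_get?_isSome X PySem.Dict.empty x o hx ho
    rcases buildF_get?_some X PySem.Dict.empty x.dropLast v hv with h' | ⟨y, hy, hk, hgl⟩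
    · exact absurd h' (by simp)
    · rw [hv, ← hgl]
      exact hcons y hy x hx hk

-- ---- B side ----

lemma altScan_spec (key : List Int) (out : Int) :
    ∀ xs, (∀ x ∈ xs, x ≠ []) →
    altScan key out xs =
      if ∀ x ∈ xs, x.dropLast = key → x.getLast? = some out then
        some (xs.filter (fun x => !(x.dropLast == key)))
      else none := by
  intro xs
  induction xs with
  | nil => intro _; simp [altScan]
  | cons x xs ih =>
    intro hne
    obtain ⟨o, ho⟩ : ∃ o, x.getLast? = some o :=
      Option.isSome_iff_exists.mp (List.getLast?_isSome.mpr (hne x (List.mem_cons_self ..)))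
    have hxs : ∀ y ∈ xs, y ≠ [] := fun y hy => hne y (List.mem_cons_of_mem _ hy)
    rw [show altScan key out (x :: xs) =
      (if PySem.List.slice x none (some (-1)) == key then
        match PySem.List.pyGet? x (-1) with
        | none => none
        | some v => if v != out then none else altScan key out xs
      else (altScan key out xs).map (x :: ·)) from rfl]
    simp only [PySem.List.slice_to_neg_one, PySem.List.pyGet?_neg_one, ho]
    by_cases hk : x.dropLast = key
    · simp only [hk, beq_self_eq_true, if_true]
      by_cases hvo : o = out
      · subst hvo
        simp only [bne_self_eq_false, Bool.false_eq_true, if_false]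
        rw [ih hxs]
        by_cases hall : ∀ y ∈ xs, y.dropLast = key → y.getLast? = some o
        · rw [if_pos hall, if_pos (by
            intro y hy hyk
            rcases List.mem_cons.mp hy with rfl | hy'
            · exact ho
            · exact hall y hy' hyk)]
          simp [hk]
        · rw [if_neg hall, if_neg (by
            intro hcontra
            exact hall (fun y hy hyk => hcontra y (List.mem_cons_of_mem _ hy) hyk))]
      · rw [if_pos (by simpa [bne_iff_ne] using hvo)]
        rw [if_neg (by
          intro hcontra
          have := hcontra x (List.mem_cons_self ..) hk
          rw [ho] at this
          exact hvo (Option.some_injective _ this))]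
    · simp only [beq_iff_eq, hk, if_false]
      rw [ih hxs]
      by_cases hall : ∀ y ∈ xs, y.dropLast = key → y.getLast? = some out
      · rw [if_pos hall, if_pos (by
          intro y hy hyk
          rcases List.mem_cons.mp hy with rfl | hy'
          · exact absurd hyk hk
          · exact hall y hy' hyk)]
        simp [hk]
      · rw [if_neg hall, if_neg (by
          intro hcontra
          exact hall (fun y hy hyk => hcontra y (List.mem_cons_of_mem _ hy) hyk))]
        rfl

lemma altGo_iff : ∀ (fuel : Nat) (X : List (List Int)), X.length ≤ fuel → (∀ x ∈ X, x ≠ []) →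
    (altGo fuel X = true ↔ Consistent X) := by
  intro fuel
  induction fuel with
  | zero =>
    intro X hlen _
    have hX : X = [] := List.eq_nil_of_length_eq_zero (Nat.le_zero.mp hlen)
    subst hX
    simp [altGo, Consistent]
  | succ n ih =>
    intro X hlen hpre
    cases X with
    | nil => simp [altGo, Consistent]
    | cons x xs =>
      obtain ⟨o, ho⟩ : ∃ o, x.getLast? = some o :=
        Option.isSome_iff_exists.mp (List.getLast?_isSome.mpr (hpre x (List.mem_cons_self ..)))
      have hxs : ∀ y ∈ xs, y ≠ [] := fun y hy => hpre y (List.mem_cons_of_mem _ hy)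
      have haS : altScan (PySem.List.slice x none (some (-1))) o xs
          = if ∀ y ∈ xs, y.dropLast = x.dropLast → y.getLast? = some o then
              some (xs.filter (fun y => !(y.dropLast == x.dropLast)))
            else none := by
        rw [PySem.List.slice_to_neg_one]
        exact altScan_spec x.dropLast o xs hxs
      by_cases hall : ∀ y ∈ xs, y.dropLast = x.dropLast → y.getLast? = some o
      · rw [if_pos hall] at haS
        simp only [altGo, PySem.List.pyGet?_neg_one, ho, haS]
        have hkeyall : ∀ y ∈ x :: xs, y.dropLast = x.dropLast → y.getLast? = some o := by
          intro y hy hyk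
          rcases List.mem_cons.mp hy with rfl | hy'
          · exact ho
          · exact hall y hy' hyk
        have hlen' : (xs.filter (fun y => !(y.dropLast == x.dropLast))).length ≤ n :=
          le_trans (List.length_filter_le _ _) (Nat.le_of_succ_le_succ hlen)
        rw [ih _ hlen' (fun y hy => hxs y (List.mem_filter.mp hy).1)]
        constructor
        · intro hc a ha b hb hab
          by_cases hak : a.dropLast = x.dropLast
          · rw [hkeyall a ha hak, hkeyall b hb (hab ▸ hak)]
          · have hbk : ¬ b.dropLast = x.dropLast := fun h => hak (hab ▸ h)
            have ha' : a ∈ xs := by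
              rcases List.mem_cons.mp ha with rfl | h
              · exact absurd rfl hak
              · exact h
            have hb' : b ∈ xs := by
              rcases List.mem_cons.mp hb with rfl | h
              · exact absurd rfl hbk
              · exact h
            exact hc a (List.mem_filter.mpr ⟨ha', by simp [hak]⟩)
              b (List.mem_filter.mpr ⟨hb', by simp [hbk]⟩) hab
        · intro hc a ha b hb hab
          exact hc a (List.mem_cons_of_mem _ (List.mem_filter.mp ha).1)
            b (List.mem_cons_of_mem _ (List.mem_filter.mp hb).1) hab
      · rw [if_neg hall] at haS
        simp only [altGo, PySem.List.pyGet?_neg_one, ho, haS]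
        simp only [Bool.false_eq_true, false_iff]
        intro hc
        push Not at hall
        obtain ⟨y, hy, hk, hne'⟩ := hall
        exact hne' (by rw [hc y (List.mem_cons_of_mem _ hy) x (List.mem_cons_self ..) hk, ho])

lemma B_iff (X : List (List Int)) (hpre : ∀ x ∈ X, x ≠ []) :
    (isDeterministic_alt X = true ↔ Consistent X) := by
  unfold isDeterministic_alt
  exact altGo_iff X.length X le_rfl hpre

-- ===== VERDICT (by name: the statement is the Claim_ definition above) =====
theorem isDeterministic_spec : Claim_equal_isDeterministic := by
  intro X _ hpre
  unfold Spec_isDeterministic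
  rw [Bool.eq_iff_iff, A_iff X hpre, B_iff X hpre]
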